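-- pv_equiv track=rewrite | github.com/Junjun-NOAA/GSL-RDASApp | rrfs-test/ush/diagnostics_and_graphics/heatmap_jo.py | categorize_obs_types
-- ===== SOURCE A (Python) =====
-- def categorize_obs_types(obs_types):
--     grouped_obs = {
--         "Temperature": [],
--         "Humidity": [],
--         "Winds": [],
--         "Pressure": []
--     }
--     for obs in obs_types:
--         if "airTemperature" in obs:
--             grouped_obs["Temperature"].append(obs)
--         elif "specificHumidity" in obs:
--             grouped_obs["Humidity"].append(obs)
--         elif "winds" in obs:
--             grouped_obs["Winds"].append(obs)
--         elif "stationPressure" in obs: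
--             grouped_obs["Pressure"].append(obs)
--     return {k: v for k, v in grouped_obs.items() if v}
-- ===== SOURCE B (Python) =====
-- def categorize_obs_types(obs_types):
--     rules = [("Temperature", "airTemperature"),
--              ("Humidity", "specificHumidity"),
--              ("Winds", "winds"),
--              ("Pressure", "stationPressure")]
--
--     def category(obs):
--         for name, marker in rules:
--             if marker in obs:
--                 return name
--         return None
--
--     out = {}
--     for name, _ in rules:
--         members = [obs for obs in obs_types if category(obs) == name]
--         if members:
--             out[name] = members
--     return out
-- ===== Notes on version B (the rewrite author's own statement) =====
-- stated objective: idiomatic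
-- what changed: A makes one pass appending through a hard-coded elif chain into pre-seeded buckets; B keeps a declarative rule table (marker, category), classifies each obs by first matching rule, and builds the result with one filter pass per category, inserting only non-empty groups.
import Mathlib
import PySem

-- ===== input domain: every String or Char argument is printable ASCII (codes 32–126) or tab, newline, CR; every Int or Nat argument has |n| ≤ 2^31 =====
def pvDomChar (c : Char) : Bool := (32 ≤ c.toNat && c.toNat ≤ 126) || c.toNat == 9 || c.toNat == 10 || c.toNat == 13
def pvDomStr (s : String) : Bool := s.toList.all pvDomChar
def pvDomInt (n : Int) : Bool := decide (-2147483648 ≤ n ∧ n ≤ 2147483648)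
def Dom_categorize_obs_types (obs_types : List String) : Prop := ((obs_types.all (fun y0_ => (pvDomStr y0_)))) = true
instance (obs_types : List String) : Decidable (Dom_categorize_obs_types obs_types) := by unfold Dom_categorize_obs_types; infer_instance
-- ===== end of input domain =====

-- B replaces A's single-pass elif-append loop by a rule table and one filter pass per category (idiomatic, same cost).

-- ===== PORT A =====
-- the body of A's for-loop: an elif chain appending obs to the matching bucket
def aStep (d : PySem.Dict String (List String)) (obs : String) : PySem.Dict String (List String) :=
  if PySem.Str.isIn "airTemperature" obs then d.modify "Temperature" [] (fun v => v ++ [obs])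
  else if PySem.Str.isIn "specificHumidity" obs then d.modify "Humidity" [] (fun v => v ++ [obs])
  else if PySem.Str.isIn "winds" obs then d.modify "Winds" [] (fun v => v ++ [obs])
  else if PySem.Str.isIn "stationPressure" obs then d.modify "Pressure" [] (fun v => v ++ [obs])
  else d

def categorize_obs_types (obs_types : List String) : List (String × List String) :=
  let grouped := obs_types.foldl aStep
    (PySem.Dict.ofList [("Temperature", []), ("Humidity", []), ("Winds", []), ("Pressure", [])])
  -- {k: v for k, v in grouped_obs.items() if v}
  (grouped.items.filter (fun p => !p.2.isEmpty))

-- ===== PORT B =====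
def bRules : List (String × String) :=
  [("Temperature", "airTemperature"), ("Humidity", "specificHumidity"),
   ("Winds", "winds"), ("Pressure", "stationPressure")]

-- 'def category(obs)': first rule whose marker is a substring of obs
def bCategory : List (String × String) → String → Option String
  | [], _ => none
  | (name, marker) :: rest, obs =>
      if PySem.Str.isIn marker obs then some name else bCategory rest obs

def categorize_obs_types_alt (obs_types : List String) : List (String × List String) :=
  (bRules.foldl (fun (out : PySem.Dict String (List String)) (rule : String × String) =>
      let members := obs_types.filter (fun obs => bCategory bRules obs == some rule.1)
      if members.isEmpty then out else out.insert rule.1 members)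
    PySem.Dict.empty).items

-- ===== PRECONDITION & SPEC =====
def Spec_categorize_obs_types (obs_types : List String) (out : List (String × List String)) : Prop := out = categorize_obs_types_alt obs_types
instance (obs_types : List String) (out : List (String × List String)) : Decidable (Spec_categorize_obs_types obs_types out) := by unfold Spec_categorize_obs_types; infer_instance

-- ===== CLAIM (what is proved, stated in full; the proofs are below) =====
def Claim_equal_categorize_obs_types : Prop := ∀ (obs_types : List String), Dom_categorize_obs_types obs_types → Spec_categorize_obs_types obs_types (categorize_obs_types obs_types)

-- ===== LEMMAS AND PROOFS =====

-- the four (disjoint) membership predicates implied by A's elif chain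
def pT (s : String) : Bool := PySem.Str.isIn "airTemperature" s
def pH (s : String) : Bool := !pT s && PySem.Str.isIn "specificHumidity" s
def pW (s : String) : Bool :=
  !pT s && !(PySem.Str.isIn "specificHumidity" s) && PySem.Str.isIn "winds" s
def pP (s : String) : Bool :=
  !pT s && !(PySem.Str.isIn "specificHumidity" s) && !(PySem.Str.isIn "winds" s)
    && PySem.Str.isIn "stationPressure" s

lemma foldA_eq (xs : List String) (a b c d : List String) :
    xs.foldl aStep (PySem.Dict.mk [("Temperature", a), ("Humidity", b), ("Winds", c), ("Pressure", d)])
      = PySem.Dict.mk [("Temperature", a ++ xs.filter pT), ("Humidity", b ++ xs.filter pH),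
                       ("Winds", c ++ xs.filter pW), ("Pressure", d ++ xs.filter pP)] := by
  induction xs generalizing a b c d with
  | nil => simp
  | cons x xs ih =>
      rw [List.foldl_cons]
      by_cases h1 : PySem.Str.isIn "airTemperature" x = true
      · have hT : pT x = true := h1
        have hH : pH x = false := by simp only [pH, pT, h1, Bool.not_true, Bool.false_and]
        have hW : pW x = false := by simp only [pW, pT, h1, Bool.not_true, Bool.false_and]
        have hP : pP x = false := by simp only [pP, pT, h1, Bool.not_true, Bool.false_and]
        rw [show aStep (PySem.Dict.mk [("Temperature", a), ("Humidity", b), ("Winds", c), ("Pressure", d)]) x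
              = PySem.Dict.mk [("Temperature", a ++ [x]), ("Humidity", b), ("Winds", c), ("Pressure", d)] from by
          unfold aStep
          rw [if_pos h1]
          simp [PySem.Dict.modify, PySem.Dict.getD, PySem.Dict.get?, PySem.Dict.insert,
                PySem.Dict.contains]]
        rw [ih]
        simp [List.filter_cons, hT, hH, hW, hP]
      · have hf1 : PySem.Str.isIn "airTemperature" x = false := Bool.eq_false_iff.mpr h1
        have hT : pT x = false := hf1
        by_cases h2 : PySem.Str.isIn "specificHumidity" x = true
        · have hH : pH x = true := by
            simp only [pH, pT, hf1, h2, Bool.not_false, Bool.true_and]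
          have hW : pW x = false := by
            simp only [pW, pT, hf1, h2, Bool.not_false, Bool.not_true, Bool.true_and, Bool.false_and]
          have hP : pP x = false := by
            simp only [pP, pT, hf1, h2, Bool.not_false, Bool.not_true, Bool.true_and, Bool.false_and]
          rw [show aStep (PySem.Dict.mk [("Temperature", a), ("Humidity", b), ("Winds", c), ("Pressure", d)]) x
                = PySem.Dict.mk [("Temperature", a), ("Humidity", b ++ [x]), ("Winds", c), ("Pressure", d)] from by
            unfold aStep
            rw [if_neg h1, if_pos h2]
            simp [PySem.Dict.modify, PySem.Dict.getD, PySem.Dict.get?, PySem.Dict.insert,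
                  PySem.Dict.contains]]
          rw [ih]
          simp [List.filter_cons, hT, hH, hW, hP]
        · have hf2 : PySem.Str.isIn "specificHumidity" x = false := Bool.eq_false_iff.mpr h2
          have hH : pH x = false := by simp only [pH, pT, hf1, hf2, Bool.not_false, Bool.true_and]
          by_cases h3 : PySem.Str.isIn "winds" x = true
          · have hW : pW x = true := by
              simp only [pW, pT, hf1, hf2, h3, Bool.not_false, Bool.true_and]
            have hP : pP x = false := by
              simp only [pP, pT, hf1, hf2, h3, Bool.not_false, Bool.not_true, Bool.true_and, Bool.false_and]
            rw [show aStep (PySem.Dict.mk [("Temperature", a), ("Humidity", b), ("Winds", c), ("Pressure", d)]) x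
                  = PySem.Dict.mk [("Temperature", a), ("Humidity", b), ("Winds", c ++ [x]), ("Pressure", d)] from by
              unfold aStep
              rw [if_neg h1, if_neg h2, if_pos h3]
              simp [PySem.Dict.modify, PySem.Dict.getD, PySem.Dict.get?, PySem.Dict.insert,
                    PySem.Dict.contains]]
            rw [ih]
            simp [List.filter_cons, hT, hH, hW, hP]
          · have hf3 : PySem.Str.isIn "winds" x = false := Bool.eq_false_iff.mpr h3
            have hW : pW x = false := by
              simp only [pW, pT, hf1, hf2, hf3, Bool.not_false, Bool.true_and]
            by_cases h4 : PySem.Str.isIn "stationPressure" x = true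
            · have hP : pP x = true := by
                simp only [pP, pT, hf1, hf2, hf3, h4, Bool.not_false, Bool.true_and]
              rw [show aStep (PySem.Dict.mk [("Temperature", a), ("Humidity", b), ("Winds", c), ("Pressure", d)]) x
                    = PySem.Dict.mk [("Temperature", a), ("Humidity", b), ("Winds", c), ("Pressure", d ++ [x])] from by
                unfold aStep
                rw [if_neg h1, if_neg h2, if_neg h3, if_pos h4]
                simp [PySem.Dict.modify, PySem.Dict.getD, PySem.Dict.get?, PySem.Dict.insert,
                      PySem.Dict.contains]]
              rw [ih]
              simp [List.filter_cons, hT, hH, hW, hP]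
            · have hf4 : PySem.Str.isIn "stationPressure" x = false := Bool.eq_false_iff.mpr h4
              have hP : pP x = false := by
                simp only [pP, pT, hf1, hf2, hf3, hf4, Bool.not_false, Bool.true_and]
              rw [show aStep (PySem.Dict.mk [("Temperature", a), ("Humidity", b), ("Winds", c), ("Pressure", d)]) x
                    = PySem.Dict.mk [("Temperature", a), ("Humidity", b), ("Winds", c), ("Pressure", d)] from by
                unfold aStep; rw [if_neg h1, if_neg h2, if_neg h3, if_neg h4]]
              rw [ih]
              simp [List.filter_cons, hT, hH, hW, hP]

lemma bCat_T (s : String) : (bCategory [("Temperature", "airTemperature"), ("Humidity", "specificHumidity"),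
      ("Winds", "winds"), ("Pressure", "stationPressure")] s == some "Temperature") = pT s := by
  simp only [bCategory]
  by_cases h1 : PySem.Str.isIn "airTemperature" s = true
  · rw [if_pos h1, show pT s = true from h1]; decide
  · rw [if_neg h1, show pT s = false from Bool.eq_false_iff.mpr h1]
    by_cases h2 : PySem.Str.isIn "specificHumidity" s = true
    · rw [if_pos h2]; decide
    · rw [if_neg h2]
      by_cases h3 : PySem.Str.isIn "winds" s = true
      · rw [if_pos h3]; decide
      · rw [if_neg h3]
        by_cases h4 : PySem.Str.isIn "stationPressure" s = true
        · rw [if_pos h4]; decide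
        · rw [if_neg h4]; decide

lemma bCat_H (s : String) : (bCategory [("Temperature", "airTemperature"), ("Humidity", "specificHumidity"),
      ("Winds", "winds"), ("Pressure", "stationPressure")] s == some "Humidity") = pH s := by
  simp only [bCategory]
  by_cases h1 : PySem.Str.isIn "airTemperature" s = true
  · rw [if_pos h1, show pH s = false from by
      simp only [pH, pT, h1, Bool.not_true, Bool.false_and]]
    decide
  · have hf1 : PySem.Str.isIn "airTemperature" s = false := Bool.eq_false_iff.mpr h1
    rw [if_neg h1]
    by_cases h2 : PySem.Str.isIn "specificHumidity" s = true
    · rw [if_pos h2, show pH s = true from by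
        simp only [pH, pT, hf1, h2, Bool.not_false, Bool.true_and]]
      decide
    · have hf2 : PySem.Str.isIn "specificHumidity" s = false := Bool.eq_false_iff.mpr h2
      rw [if_neg h2, show pH s = false from by
        simp only [pH, pT, hf1, hf2, Bool.not_false, Bool.true_and]]
      by_cases h3 : PySem.Str.isIn "winds" s = true
      · rw [if_pos h3]; decide
      · rw [if_neg h3]
        by_cases h4 : PySem.Str.isIn "stationPressure" s = true
        · rw [if_pos h4]; decide
        · rw [if_neg h4]; decide

lemma bCat_W (s : String) : (bCategory [("Temperature", "airTemperature"), ("Humidity", "specificHumidity"),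
      ("Winds", "winds"), ("Pressure", "stationPressure")] s == some "Winds") = pW s := by
  simp only [bCategory]
  by_cases h1 : PySem.Str.isIn "airTemperature" s = true
  · rw [if_pos h1, show pW s = false from by
      simp only [pW, pT, h1, Bool.not_true, Bool.false_and]]
    decide
  · have hf1 : PySem.Str.isIn "airTemperature" s = false := Bool.eq_false_iff.mpr h1
    rw [if_neg h1]
    by_cases h2 : PySem.Str.isIn "specificHumidity" s = true
    · rw [if_pos h2, show pW s = false from by
        simp only [pW, pT, hf1, h2, Bool.not_false, Bool.not_true, Bool.true_and, Bool.false_and]]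
      decide
    · have hf2 : PySem.Str.isIn "specificHumidity" s = false := Bool.eq_false_iff.mpr h2
      rw [if_neg h2]
      by_cases h3 : PySem.Str.isIn "winds" s = true
      · rw [if_pos h3, show pW s = true from by
          simp only [pW, pT, hf1, hf2, h3, Bool.not_false, Bool.true_and]]
        decide
      · have hf3 : PySem.Str.isIn "winds" s = false := Bool.eq_false_iff.mpr h3
        rw [if_neg h3, show pW s = false from by
          simp only [pW, pT, hf1, hf2, hf3, Bool.not_false, Bool.true_and]]
        by_cases h4 : PySem.Str.isIn "stationPressure" s = true
        · rw [if_pos h4]; decide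
        · rw [if_neg h4]; decide

lemma bCat_P (s : String) : (bCategory [("Temperature", "airTemperature"), ("Humidity", "specificHumidity"),
      ("Winds", "winds"), ("Pressure", "stationPressure")] s == some "Pressure") = pP s := by
  simp only [bCategory]
  by_cases h1 : PySem.Str.isIn "airTemperature" s = true
  · rw [if_pos h1, show pP s = false from by
      simp only [pP, pT, h1, Bool.not_true, Bool.false_and]]
    decide
  · have hf1 : PySem.Str.isIn "airTemperature" s = false := Bool.eq_false_iff.mpr h1
    rw [if_neg h1]
    by_cases h2 : PySem.Str.isIn "specificHumidity" s = true
    · rw [if_pos h2, show pP s = false from by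
        simp only [pP, pT, hf1, h2, Bool.not_false, Bool.not_true, Bool.true_and, Bool.false_and]]
      decide
    · have hf2 : PySem.Str.isIn "specificHumidity" s = false := Bool.eq_false_iff.mpr h2
      rw [if_neg h2]
      by_cases h3 : PySem.Str.isIn "winds" s = true
      · rw [if_pos h3, show pP s = false from by
          simp only [pP, pT, hf1, hf2, h3, Bool.not_false, Bool.not_true, Bool.true_and, Bool.false_and]]
        decide
      · have hf3 : PySem.Str.isIn "winds" s = false := Bool.eq_false_iff.mpr h3
        rw [if_neg h3]
        by_cases h4 : PySem.Str.isIn "stationPressure" s = true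
        · rw [if_pos h4, show pP s = true from by
            simp only [pP, pT, hf1, hf2, hf3, h4, Bool.not_false, Bool.true_and]]
          decide
        · have hf4 : PySem.Str.isIn "stationPressure" s = false := Bool.eq_false_iff.mpr h4
          rw [if_neg h4, show pP s = false from by
            simp only [pP, pT, hf1, hf2, hf3, hf4, Bool.not_false, Bool.true_and]]
          decide

-- ===== VERDICT (by name: the statement is the Claim_ definition above) =====
theorem categorize_obs_types_spec : Claim_equal_categorize_obs_types := by
  intro xs _
  show categorize_obs_types xs = categorize_obs_types_alt xs
  simp only [categorize_obs_types, categorize_obs_types_alt]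
  rw [show (PySem.Dict.ofList [("Temperature", ([] : List String)), ("Humidity", []), ("Winds", []), ("Pressure", [])])
        = PySem.Dict.mk [("Temperature", []), ("Humidity", []), ("Winds", []), ("Pressure", [])] from rfl]
  rw [foldA_eq]
  simp only [bRules, List.foldl_cons, List.foldl_nil,
             List.filter_congr (fun s (_ : s ∈ xs) => bCat_T s),
             List.filter_congr (fun s (_ : s ∈ xs) => bCat_H s),
             List.filter_congr (fun s (_ : s ∈ xs) => bCat_W s),
             List.filter_congr (fun s (_ : s ∈ xs) => bCat_P s)]
  simp only [List.nil_append, List.filter_cons, List.filter_nil]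
  cases hB1 : (List.filter pT xs).isEmpty <;> cases hB2 : (List.filter pH xs).isEmpty <;>
    cases hB3 : (List.filter pW xs).isEmpty <;> cases hB4 : (List.filter pP xs).isEmpty <;>
      · simp only [hB1, hB2, hB3, hB4, Bool.not_true, Bool.not_false, eq_self_iff_true,
                   Bool.false_eq_true, if_true, if_false]
        simp [PySem.Dict.insert, PySem.Dict.contains, PySem.Dict.items, PySem.Dict.empty]
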